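-- pv_equiv track=rewrite | github.com/Geneocide/AoC2024 | 13/clawMachineOptimizerPart2.py | powerset_products
-- ===== SOURCE A (Python) =====
-- def powerset_products(s):
--     memo = set()
--     x = len(s)
--     masks = [1 << i for i in range(x)]
--     for i in range(1, 2**x):
--         subset = [ss for mask, ss in zip(masks, s) if i & mask]
--         product = 1
--         for num in subset:
--             product *= num
--         if product in memo:
--             continue
--         else:
--             memo.add(product)
--             yield product
-- ===== SOURCE B (Python) =====
-- def _raw(lst):
--     # products of all non-empty subsets in mask order, built incrementally
--     if not lst:
--         return []
--     a = lst[0]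
--     out = [a]
--     for r in _raw(lst[1:]):
--         out.append(r)
--         out.append(a * r)
--     return out
--
--
-- def powerset_products(s):
--     seen = set()
--     for p in _raw(list(s)):
--         if p not in seen:
--             seen.add(p)
--             yield p
-- ===== Notes on version B (the rewrite author's own statement) =====
-- stated objective: faster
-- what changed: A rebuilds each subset from its bit mask and re-multiplies it from scratch for every mask (O(n*2^n) multiplications); B builds the product sequence by structural recursion on the list (products of a::t are a, then r and a*r for each product r of t), one multiplication per subset (O(2^n)), then deduplicates in one pass; intended as faster, measured 5.76x at the largest size both finished (both time out beyond that since the output itself has 2^n-1 entries).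
import Mathlib
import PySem

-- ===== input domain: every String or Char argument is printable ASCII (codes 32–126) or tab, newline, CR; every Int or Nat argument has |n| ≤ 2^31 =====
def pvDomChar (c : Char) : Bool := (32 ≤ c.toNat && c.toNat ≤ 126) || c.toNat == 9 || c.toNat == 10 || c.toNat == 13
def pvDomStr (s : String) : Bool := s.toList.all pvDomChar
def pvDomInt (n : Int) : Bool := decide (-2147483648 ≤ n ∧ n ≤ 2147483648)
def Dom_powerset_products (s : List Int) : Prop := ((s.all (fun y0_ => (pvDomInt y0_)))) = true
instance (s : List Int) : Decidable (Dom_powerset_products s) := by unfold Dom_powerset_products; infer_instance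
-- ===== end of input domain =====

-- B replaces A's per-mask subset rebuild and re-multiplication by a structural recursion that
-- extends the product list with one multiplication per new subset; intended as faster (measured
-- 5.76x at the largest size where both finished; both are exponential overall, the output having
-- 2^n - 1 entries). Same distinct products in the same first-occurrence order. (Both Pythons are
-- generators; equivalence is about the yielded sequence, compared as a list.)

-- ===== PORT A =====
def powerset_products (s : List Int) : List Int :=
  let x := s.length
  let masks : List Int := (List.range x).map (fun (i : Nat) => (1 : Int) <<< i)
  ((PySem.List.pyRange 1 (2 ^ x) 1).foldl
    (fun (st : PySem.Set Int × List Int) i =>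
      let subset := ((masks.zip s).filter (fun p => PySem.Int.band i p.1 != 0)).map Prod.snd
      let product := subset.foldl (fun acc num => acc * num) 1
      if PySem.Set.contains st.1 product then st
      else (PySem.Set.add st.1 product, st.2 ++ [product]))
    (PySem.Set.empty, [])).2

-- ===== PORT B =====
-- products of all non-empty subsets in mask order, built incrementally (_raw in Source B)
def pvRaw : List Int → List Int
  | [] => []
  | a :: t => (pvRaw t).foldl (fun out r => out ++ [r, a * r]) [a]

def powerset_products_alt (s : List Int) : List Int :=
  ((pvRaw s).foldl
    (fun (st : PySem.Set Int × List Int) p =>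
      if PySem.Set.contains st.1 p then st
      else (PySem.Set.add st.1 p, st.2 ++ [p]))
    (PySem.Set.empty, [])).2

-- ===== PRECONDITION & SPEC =====
def Spec_powerset_products (s : List Int) (out : List Int) : Prop := out = powerset_products_alt s
instance (s : List Int) (out : List Int) : Decidable (Spec_powerset_products s out) := by unfold Spec_powerset_products; infer_instance

-- ===== CLAIM (what is proved, stated in full; the proofs are below) =====
def Claim_equal_powerset_products : Prop := ∀ (s : List Int), Dom_powerset_products s → Spec_powerset_products s (powerset_products s)

-- ===== LEMMAS AND PROOFS =====

-- the subset A builds for mask i, read off bit by bit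
def pvSub : List Int → Nat → List Int
  | [], _ => []
  | a :: t, i => (if i % 2 = 1 then [a] else []) ++ pvSub t (i / 2)

-- the product A computes for mask i, read off bit by bit
def pvP : List Int → Nat → Int
  | [], _ => 1
  | a :: t, i => (if i % 2 = 1 then a else 1) * pvP t (i / 2)

theorem pvSub_filter (s : List Int) (c k : Nat) :
    ((((List.range s.length).map (fun j => (1 : Int) <<< (j + c))).zip s).filter
        (fun p => PySem.Int.band (k : Int) p.1 != 0)).map Prod.snd
      = pvSub s (k >>> c) := by
  induction s generalizing c with
  | nil => simp [pvSub]
  | cons a t ih =>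
    have hmask : (1 : Int) <<< c = ((2 ^ c : Nat) : Int) := by
      rw [Int.shiftLeft_eq]; push_cast; ring
    have hcond : (PySem.Int.band (k : Int) ((1 : Int) <<< c) != 0)
        = decide ((k >>> c) % 2 = 1) := by
      rw [hmask, PySem.Int.band_natCast, Nat.shiftRight_eq_div_pow]
      cases h : Nat.testBit k c with
      | false =>
        have h1 : k &&& 2 ^ c = 0 := by rw [Nat.and_two_pow, h]; simp
        have h2 : ¬ (k / 2 ^ c % 2 = 1) := by
          rw [Nat.testBit_eq_decide_div_mod_eq] at h; simpa using h
        simp [h1, h2]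
      | true =>
        have h1 : k &&& 2 ^ c = 2 ^ c := by rw [Nat.and_two_pow, h]; simp
        have h2 : k / 2 ^ c % 2 = 1 := by
          rw [Nat.testBit_eq_decide_div_mod_eq] at h; simpa using h
        simp [h1, h2]
    simp only [List.length_cons, List.range_succ_eq_map, List.map_cons, List.map_map,
      List.zip_cons_cons, List.filter_cons, Nat.zero_add]
    have hre : ((List.range t.length).map ((fun j => (1 : Int) <<< (j + c)) ∘ (· + 1)))
        = (List.range t.length).map (fun j => (1 : Int) <<< (j + (c + 1))) := by
      apply List.map_congr_left; intro j _; simp only [Function.comp]; ring_nf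
    rw [hre, hcond]
    have ht := ih (c + 1)
    rw [Nat.shiftRight_succ] at ht
    by_cases hodd : (k >>> c) % 2 = 1 <;> simp [hodd, pvSub, ht]

theorem pvP_eq_prod (s : List Int) (i : Nat) : (pvSub s i).prod = pvP s i := by
  induction s generalizing i with
  | nil => simp [pvSub, pvP]
  | cons a t ih =>
    by_cases h : i % 2 = 1 <;> simp [pvSub, pvP, h, ih]

theorem pvP_zero (s : List Int) : pvP s 0 = 1 := by
  induction s with
  | nil => simp [pvP]
  | cons a t ih => simp [pvP, ih]

theorem range_pair (m : Nat) :
    List.range (2 * m + 1) = 0 :: (List.range m).flatMap (fun k => [2 * k + 1, 2 * k + 2]) := by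
  induction m with
  | zero => simp
  | succ n ih =>
    have : 2 * (n + 1) + 1 = (2 * n + 1) + 1 + 1 := by ring
    rw [this, List.range_succ, List.range_succ, ih, List.range_succ]
    simp [List.flatMap_append]

theorem map_pvP_eq_pvRaw (s : List Int) :
    (List.range (2 ^ s.length - 1)).map (fun k => pvP s (1 + k)) = pvRaw s := by
  induction s with
  | nil => simp [pvRaw]
  | cons a t ih =>
    have h1 : (1 : Nat) ≤ 2 ^ t.length := Nat.one_le_two_pow
    have hm : 2 ^ (a :: t).length - 1 = 2 * (2 ^ t.length - 1) + 1 := by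
      simp [List.length_cons, pow_succ]; omega
    rw [hm, range_pair, List.map_cons, List.map_flatMap]
    have h0 : pvP (a :: t) (1 + 0) = a := by
      simp [pvP, pvP_zero]
    have hB : pvRaw (a :: t) = a :: (pvRaw t).flatMap (fun r => [r, a * r]) := by
      show (pvRaw t).foldl (fun out r => out ++ [r, a * r]) [a] = _
      rw [PySem.List.foldl_append_eq_flatMap]
      simp
    rw [h0, hB, ← ih, List.flatMap_map]
    congr 1
    congr 1
    funext k
    have e1 : 1 + (2 * k + 1) = 2 * (k + 1) := by ring
    have e2 : 1 + (2 * k + 2) = 2 * (k + 1) + 1 := by ring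
    have m1 : 2 * (k + 1) % 2 = 0 := by omega
    have d1 : 2 * (k + 1) / 2 = k + 1 := by omega
    have m2 : (2 * (k + 1) + 1) % 2 = 1 := by omega
    have d2 : (2 * (k + 1) + 1) / 2 = k + 1 := by omega
    simp [e1, e2, pvP, m1, d1, m2, d2, Nat.add_comm 1 k]

theorem prodA_eq (s : List Int) (k : Nat) :
    (((((List.range s.length).map (fun (i : Nat) => (1 : Int) <<< i)).zip s).filter
        (fun p => PySem.Int.band ((1 : Int) + (k : Int)) p.1 != 0)).map Prod.snd).foldl
      (fun acc num => acc * num) 1 = pvP s (1 + k) := by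
  have hc : ((1 : Int) + (k : Int)) = ((1 + k : Nat) : Int) := by push_cast; ring
  have hmask : ((List.range s.length).map (fun (i : Nat) => (1 : Int) <<< i))
      = (List.range s.length).map (fun (j : Nat) => (1 : Int) <<< (j + 0)) := by simp
  rw [hc, hmask, pvSub_filter s 0 (1 + k), Nat.shiftRight_zero]
  rw [show (fun (acc num : Int) => acc * num) = (· * ·) from rfl]
  rw [← List.prod_eq_foldl, pvP_eq_prod]

-- ===== VERDICT (by name: the statement is the Claim_ definition above) =====
theorem powerset_products_spec : Claim_equal_powerset_products := by
  intro s _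
  unfold Spec_powerset_products powerset_products powerset_products_alt
  dsimp only
  have h1 : (1 : Nat) ≤ 2 ^ s.length := Nat.one_le_two_pow
  have htn : ((2 : Int) ^ s.length - 1).toNat = 2 ^ s.length - 1 := by
    have h2 : ((2 : Int) ^ s.length) = ((2 ^ s.length : Nat) : Int) := by push_cast; ring
    rw [h2]; omega
  rw [PySem.List.pyRange_one, htn, List.foldl_map]
  have hstep : (fun (x : PySem.Set Int × List Int) (y : Nat) =>
      if x.1.contains (List.foldl (fun acc num => acc * num) 1
          (List.map Prod.snd (List.filter (fun p => PySem.Int.band (1 + (y : Int)) p.1 != 0)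
            ((List.map (fun (i : Nat) => (1 : Int) <<< i) (List.range s.length)).zip s)))) = true
        then x
      else (x.1.add (List.foldl (fun acc num => acc * num) 1
          (List.map Prod.snd (List.filter (fun p => PySem.Int.band (1 + (y : Int)) p.1 != 0)
            ((List.map (fun (i : Nat) => (1 : Int) <<< i) (List.range s.length)).zip s)))),
        x.2 ++ [List.foldl (fun acc num => acc * num) 1
          (List.map Prod.snd (List.filter (fun p => PySem.Int.band (1 + (y : Int)) p.1 != 0)
            ((List.map (fun (i : Nat) => (1 : Int) <<< i) (List.range s.length)).zip s)))]))
      = (fun (x : PySem.Set Int × List Int) (y : Nat) =>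
        if x.1.contains (pvP s (1 + y)) = true then x
        else (x.1.add (pvP s (1 + y)), x.2 ++ [pvP s (1 + y)])) := by
    funext x y
    rw [prodA_eq s y]
  rw [hstep, ← map_pvP_eq_pvRaw s, List.foldl_map]
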